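-- pv_equiv track=rewrite | github.com/bheil123/crossplay | crossplay/mc_eval.py | _limit_blanks
-- ===== SOURCE A (Python) =====
-- def _limit_blanks(tiles: str, max_blanks: int = 2) -> str:
--     """Limit blanks in tile string to avoid exponential move generation."""
--     blank_count = tiles.count('?')
--     if blank_count <= max_blanks:
--         return tiles
--     result = []
--     blanks_kept = 0
--     for c in tiles:
--         if c == '?':
--             if blanks_kept < max_blanks:
--                 result.append(c)
--                 blanks_kept += 1
--         else:
--             result.append(c)
--     return ''.join(result)
-- ===== SOURCE B (Python) =====
-- def _limit_blanks(tiles: str, max_blanks: int = 2) -> str: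
--     parts = tiles.split('?')
--     k = max(max_blanks, 0)
--     return '?'.join(parts[:k + 1]) + ''.join(parts[k + 1:])
-- ===== Notes on version B (the rewrite author's own statement) =====
-- stated objective: simpler
-- what changed: Replaces the count-then-character-filter loop with a split-and-rejoin over segments: split the string at the blank tile character, restore the first max(max_blanks,0) separators and concatenate the remaining segments, which subsumes the early return.
import Mathlib
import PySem

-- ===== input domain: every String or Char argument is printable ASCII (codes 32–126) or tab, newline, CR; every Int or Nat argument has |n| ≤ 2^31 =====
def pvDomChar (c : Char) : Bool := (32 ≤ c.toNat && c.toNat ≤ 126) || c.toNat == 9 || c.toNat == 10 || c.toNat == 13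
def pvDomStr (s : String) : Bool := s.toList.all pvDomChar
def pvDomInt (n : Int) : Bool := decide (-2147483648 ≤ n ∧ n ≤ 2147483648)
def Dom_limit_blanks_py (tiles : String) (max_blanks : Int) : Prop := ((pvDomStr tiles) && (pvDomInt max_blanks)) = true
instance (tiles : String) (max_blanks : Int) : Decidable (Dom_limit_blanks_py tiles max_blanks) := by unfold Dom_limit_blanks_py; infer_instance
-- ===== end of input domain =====

-- B replaces A's count-then-character-filter loop by a split at the blank character and a rejoin restoring only the first max_blanks separators (simpler decomposition, same cost).


-- ===== PORT A =====
def limit_blanks_py (tiles : String) (max_blanks : Int) : String :=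
  let blank_count : Int := (PySem.Str.count tiles "?" : Int)
  if blank_count ≤ max_blanks then tiles
  else
    let st := tiles.toList.foldl (fun (st : List Char × Int) c =>
      if c == '?' then
        (if st.2 < max_blanks then (st.1 ++ [c], st.2 + 1) else st)
      else (st.1 ++ [c], st.2)) ([], 0)
    String.mk st.1

-- ===== PORT B =====
def limit_blanks_py_alt (tiles : String) (max_blanks : Int) : String :=
  let parts := PySem.Chars.splitOn tiles.toList ['?']
  let k : Int := max max_blanks 0
  String.mk (PySem.Chars.join ['?'] (PySem.List.slice parts none (some (k + 1))) ++
             PySem.Chars.join [] (PySem.List.slice parts (some (k + 1)) none))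

-- ===== PRECONDITION & SPEC =====
def Spec_limit_blanks_py (tiles : String) (max_blanks : Int) (out : String) : Prop := out = limit_blanks_py_alt tiles max_blanks
instance (tiles : String) (max_blanks : Int) (out : String) : Decidable (Spec_limit_blanks_py tiles max_blanks out) := by unfold Spec_limit_blanks_py; infer_instance

-- ===== CLAIM (what is proved, stated in full; the proofs are below) =====
def Claim_equal_limit_blanks_py : Prop := ∀ (tiles : String) (max_blanks : Int), Dom_limit_blanks_py tiles max_blanks → Spec_limit_blanks_py tiles max_blanks (limit_blanks_py tiles max_blanks)

-- ===== LEMMAS AND PROOFS =====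

/-- The canonical result: keep at most `b` '?' characters, everything else unchanged. -/
def pvKeep : Nat → List Char → List Char
  | _, [] => []
  | 0, c :: r => if c = '?' then pvKeep 0 r else c :: pvKeep 0 r
  | b + 1, c :: r => if c = '?' then '?' :: pvKeep b r else c :: pvKeep (b + 1) r

/-- Prepend a char to the first piece of a split. -/
def pvPrep (c : Char) : List (List Char) → List (List Char)
  | [] => [[c]]
  | p :: ps => (c :: p) :: ps

/-- Structural single-char split on '?'. -/
def pvSplitQ : List Char → List (List Char)
  | [] => [[]]
  | c :: r => if c = '?' then [] :: pvSplitQ r else pvPrep c (pvSplitQ r)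

theorem pvSplitQ_ne_nil (l : List Char) : pvSplitQ l ≠ [] := by
  induction l with
  | nil => simp [pvSplitQ]
  | cons c r ih =>
    simp only [pvSplitQ]
    split_ifs
    · simp
    · cases h : pvSplitQ r <;> simp [pvPrep]

theorem pv_count_go_spec (fuel : Nat) : ∀ (l : List Char) (acc : Nat), l.length ≤ fuel →
    PySem.Chars.count.go ['?'] fuel l acc = acc + l.count '?' := by
  induction fuel with
  | zero =>
    intro l acc h
    have : l = [] := by cases l <;> simp_all
    subst this; simp [PySem.Chars.count.go]
  | succ n ih =>
    intro l acc h
    cases l with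
    | nil => simp [PySem.Chars.count.go]
    | cons c r =>
      rw [PySem.Chars.count.go]
      by_cases hc : c = '?'
      · subst hc
        simp only [List.isPrefixOf, BEq.rfl, Bool.true_and, if_true, List.length_cons,
          List.length_nil, List.drop_succ_cons, List.drop_zero]
        rw [ih r (acc + 1) (by simpa using h)]
        simp [List.count_cons]
        try omega
      · have hpre : (['?'].isPrefixOf (c :: r)) = false := by
          simp [List.isPrefixOf]
          exact fun h' => (hc h'.symm).elim
        rw [hpre]
        simp only [Bool.false_eq_true, if_false]
        rw [ih r acc (by simpa using h)]
        simp [List.count_cons, hc]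

theorem pv_count_q (l : List Char) : PySem.Chars.count l ['?'] = l.count '?' := by
  simp only [PySem.Chars.count, List.isEmpty_cons, Bool.false_eq_true, if_false]
  have := pv_count_go_spec (l.length) l 0 (le_refl _)
  simpa using this

theorem pv_split_go_spec (fuel : Nat) : ∀ (l cur : List Char) (acc : List (List Char)),
    l.length ≤ fuel →
    PySem.Chars.splitOn.go ['?'] fuel l cur acc =
      acc.reverse ++ (match pvSplitQ l with
        | [] => [cur.reverse]
        | p :: ps => (cur.reverse ++ p) :: ps) := by
  induction fuel with
  | zero =>
    intro l cur acc h
    have : l = [] := by cases l <;> simp_all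
    subst this
    simp [PySem.Chars.splitOn.go, pvSplitQ]
  | succ n ih =>
    intro l cur acc h
    cases l with
    | nil => simp [PySem.Chars.splitOn.go, pvSplitQ]
    | cons c r =>
      rw [PySem.Chars.splitOn.go]
      by_cases hc : c = '?'
      · subst hc
        simp only [List.isPrefixOf, BEq.rfl, Bool.true_and, if_true, List.length_cons,
          List.length_nil, List.drop_succ_cons, List.drop_zero]
        rw [ih r [] (cur.reverse :: acc) (by simpa using h)]
        have hne := pvSplitQ_ne_nil r
        cases hq : pvSplitQ r with
        | nil => exact absurd hq hne
        | cons p ps => simp [pvSplitQ, hq]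
      · have hpre : (['?'].isPrefixOf (c :: r)) = false := by
          simp [List.isPrefixOf]
          exact fun h' => (hc h'.symm).elim
        rw [hpre]
        simp only [Bool.false_eq_true, if_false]
        rw [ih r (c :: cur) acc (by simpa using h)]
        have hne := pvSplitQ_ne_nil r
        cases hq : pvSplitQ r with
        | nil => exact absurd hq hne
        | cons p ps => simp [pvSplitQ, hc, hq, pvPrep]

theorem pv_splitOn_q (l : List Char) : PySem.Chars.splitOn l ['?'] = pvSplitQ l := by
  show PySem.Chars.splitOn.go ['?'] (l.length + 1) l [] [] = _
  rw [pv_split_go_spec (l.length + 1) l [] [] (by omega)]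
  have hne := pvSplitQ_ne_nil l
  cases hq : pvSplitQ l with
  | nil => exact absurd hq hne
  | cons p ps => simp

theorem pv_foldlA (m : Int) (l : List Char) : ∀ (acc : List Char) (j : Int),
    (l.foldl (fun (st : List Char × Int) c =>
      if c == '?' then
        (if st.2 < m then (st.1 ++ [c], st.2 + 1) else st)
      else (st.1 ++ [c], st.2)) (acc, j)).1 = acc ++ pvKeep (m - j).toNat l := by
  induction l with
  | nil => intro acc j; simp [pvKeep]
  | cons c r ih =>
    intro acc j
    by_cases hc : c = '?'
    · subst hc
      by_cases hj : j < m
      · have hb : (m - j).toNat = (m - (j + 1)).toNat + 1 := by omega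
        simp only [List.foldl_cons, BEq.rfl, if_true, hj, if_true]
        rw [ih (acc ++ ['?']) (j + 1), hb]
        simp [pvKeep]
      · have hb : (m - j).toNat = 0 := by omega
        have hb2 : (m - j).toNat = (m - j).toNat := rfl
        simp only [List.foldl_cons, BEq.rfl, if_true, hj, if_false]
        rw [ih acc j, hb]
        cases hq : (m - j).toNat with
        | zero => simp [pvKeep, hb ▸ hq]
        | succ k => omega
    · have hcb : (c == '?') = false := by simp [hc]
      simp only [List.foldl_cons, hcb, Bool.false_eq_true, if_false]
      rw [ih (acc ++ [c]) j]
      cases hq : (m - j).toNat with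
      | zero => simp [pvKeep, hc]
      | succ k => simp [pvKeep, hc]

theorem pv_keep_of_count_le (b : Nat) (l : List Char) (h : l.count '?' ≤ b) : pvKeep b l = l := by
  induction l generalizing b with
  | nil => simp [pvKeep]
  | cons c r ih =>
    by_cases hc : c = '?'
    · subst hc
      simp only [List.count_cons, BEq.rfl, if_true] at h
      cases b with
      | zero => omega
      | succ k =>
        simp [pvKeep, ih k (by omega)]
    · have : r.count '?' ≤ b := by
        simp [List.count_cons, hc] at h; omega
      cases b with
      | zero => simp [pvKeep, hc, ih 0 this]
      | succ k => simp [pvKeep, hc, ih (k + 1) this]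

theorem pvKeep_cons_ne (b : Nat) (c : Char) (r : List Char) (hc : ¬ c = '?') :
    pvKeep b (c :: r) = c :: pvKeep b r := by
  cases b <;> simp [pvKeep, hc]

theorem pv_join_cons (c : Char) (p : List Char) (l : List (List Char)) :
    PySem.Chars.join ['?'] ((c :: p) :: l) = c :: PySem.Chars.join ['?'] (p :: l) := by
  cases l with
  | nil => simp [PySem.Chars.join_singleton]
  | cons q qs =>
    rw [PySem.Chars.join_cons_cons, PySem.Chars.join_cons_cons]
    simp

theorem pv_join_nil_splitQ (l : List Char) : PySem.Chars.join [] (pvSplitQ l) = pvKeep 0 l := by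
  induction l with
  | nil => simp [pvSplitQ, pvKeep, PySem.Chars.join_singleton]
  | cons c r ih =>
    have hne := pvSplitQ_ne_nil r
    by_cases hc : c = '?'
    · subst hc
      simp only [pvSplitQ, if_true]
      cases hq : pvSplitQ r with
      | nil => exact absurd hq hne
      | cons p ps =>
        rw [PySem.Chars.join_cons_cons]
        rw [hq] at ih
        simp [pvKeep, ih]
    · simp only [pvSplitQ, hc, if_false]
      cases hq : pvSplitQ r with
      | nil => exact absurd hq hne
      | cons p ps =>
        rw [hq] at ih
        simp only [pvPrep]
        rw [pvKeep_cons_ne 0 c r hc, ← ih]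
        cases ps with
        | nil => simp [PySem.Chars.join_singleton]
        | cons q qs =>
          rw [PySem.Chars.join_cons_cons, PySem.Chars.join_cons_cons]
          simp

theorem pv_joinKeep (l : List Char) : ∀ (b : Nat),
    PySem.Chars.join ['?'] ((pvSplitQ l).take (b + 1)) ++
      PySem.Chars.join [] ((pvSplitQ l).drop (b + 1)) = pvKeep b l := by
  induction l with
  | nil =>
    intro b
    simp [pvSplitQ, pvKeep, PySem.Chars.join_singleton, PySem.Chars.join_nil]
  | cons c r ih =>
    intro b
    have hne := pvSplitQ_ne_nil r
    by_cases hc : c = '?'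
    · subst hc
      simp only [pvSplitQ, if_true]
      cases b with
      | zero =>
        simp only [List.take_succ_cons, List.take_zero, List.drop_succ_cons, List.drop_zero]
        rw [PySem.Chars.join_singleton]
        simp only [List.nil_append]
        rw [pv_join_nil_splitQ r]
        simp [pvKeep]
      | succ b' =>
        simp only [List.take_succ_cons, List.drop_succ_cons]
        cases hq : pvSplitQ r with
        | nil => exact absurd hq hne
        | cons p ps =>
          have htk : (p :: ps).take (b' + 1) = p :: ps.take b' := by simp
          rw [htk, PySem.Chars.join_cons_cons]
          have hih := ih b'
          rw [hq] at hih
          simp only [List.take_succ_cons, List.drop_succ_cons] at hih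
          simp only [pvKeep, if_true]
          rw [← hih]
          simp
    · simp only [pvSplitQ, hc, if_false]
      cases hq : pvSplitQ r with
      | nil => exact absurd hq hne
      | cons p ps =>
        have hih := ih b
        rw [hq] at hih
        simp only [List.take_succ_cons, List.drop_succ_cons] at hih
        simp only [pvPrep, List.take_succ_cons, List.drop_succ_cons]
        rw [pv_join_cons, pvKeep_cons_ne b c r hc, List.cons_append, hih]

theorem pv_A_eq (tiles : String) (m : Int) :
    limit_blanks_py tiles m = String.mk (pvKeep (max m 0).toNat tiles.toList) := by
  unfold limit_blanks_py
  by_cases h : (PySem.Str.count tiles "?" : Int) ≤ m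
  · simp only [h, if_true]
    have hcnt : tiles.toList.count '?' ≤ (max m 0).toNat := by
      rw [PySem.Str.count_eq] at h
      have : PySem.Chars.count tiles.toList ['?'] = tiles.toList.count '?' := pv_count_q _
      simp [this] at h
      omega
    rw [pv_keep_of_count_le _ _ hcnt]
    exact (String.ofList_toList (s := tiles)).symm
  · simp only [h, if_false]
    have := pv_foldlA m tiles.toList [] 0
    simp only [List.nil_append] at this
    rw [this]
    congr 1
    congr 1
    omega

theorem pv_B_eq (tiles : String) (m : Int) :
    limit_blanks_py_alt tiles m = String.mk (pvKeep (max m 0).toNat tiles.toList) := by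
  show String.mk (PySem.Chars.join ['?'] (PySem.List.slice (PySem.Chars.splitOn tiles.toList ['?']) none (some (max m 0 + 1))) ++
      PySem.Chars.join [] (PySem.List.slice (PySem.Chars.splitOn tiles.toList ['?']) (some (max m 0 + 1)) none)) = _
  have hk : (0 : Int) ≤ max m 0 + 1 := by omega
  rw [PySem.List.slice_to _ hk, PySem.List.slice_from _ hk]
  have hb : (max m 0 + 1).toNat = (max m 0).toNat + 1 := by omega
  rw [hb, pv_splitOn_q, pv_joinKeep]

-- ===== VERDICT (by name: the statement is the Claim_ definition above) =====
theorem limit_blanks_py_spec : Claim_equal_limit_blanks_py := by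
  intro tiles m _
  unfold Spec_limit_blanks_py
  rw [pv_A_eq, pv_B_eq]
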